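-- pv_equiv track=rewrite | github.com/sundai-club/linguistic-evolutionary-experiments | make_permutations.py | make_permutations
-- ===== SOURCE A (Python) =====
-- def make_permutations(n):
--     """Generate 10 basis vectors with non-random patterns that can extend to arbitrary lengths.
--
--     Args:
--         n (int): Length of binary strings (should be multiple of 10 for best results)
--
--     Returns:
--         list: Array of 10 basis vectors with deterministic patterns
--     """
--     def create_basis_pattern(pattern_id, length):
--         """Create a specific basis pattern for given length."""
--         if pattern_id == 0:  # Alternating: 1010101010...
--             return ''.join(['1' if i % 2 == 0 else '0' for i in range(length)])
--         elif pattern_id == 1:  # Alternating reverse: 0101010101...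
--             return ''.join(['0' if i % 2 == 0 else '1' for i in range(length)])
--         elif pattern_id == 2:  # First half 1s, second half 0s: 1111100000...
--             half = length // 2
--             return '1' * half + '0' * (length - half)
--         elif pattern_id == 3:  # First half 0s, second half 1s: 0000011111...
--             half = length // 2
--             return '0' * half + '1' * (length - half)
--         elif pattern_id == 4:  # Every 4th: 0011001100...
--             return ''.join(['1' if (i // 2) % 2 == 1 else '0' for i in range(length)])
--         elif pattern_id == 5:  # Every 4th reverse: 1100110011...
--             return ''.join(['0' if (i // 2) % 2 == 1 else '1' for i in range(length)])
--         elif pattern_id == 6:  # Every 3rd: 001001001...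
--             return ''.join(['1' if i % 3 == 2 else '0' for i in range(length)])
--         # elif pattern_id == 7:  # Fibonacci-like: 0110100110...
--         #     pattern = '01101001'
--         #     return (pattern * ((length // len(pattern)) + 1))[:length]
--         elif pattern_id == 7:  # Quarters: 0011110000...
--             quarter = length // 4
--             return '0' * quarter + '1' * (2 * quarter) + '0' * (length - 3 * quarter)
--         elif pattern_id == 8:  # Every 5th: 00001000010...
--             return ''.join(['1' if i % 5 == 4 else '0' for i in range(length)])
--         elif pattern_id == 9:  # Block pattern: 000111000111...
--             return ''.join(['1' if (i // 3) % 2 == 1 else '0' for i in range(length)])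
--         # elif pattern_id == 7:  # Fibonacci-like: 0110100110...
--         #     pattern = '01101001'
--         #     return (pattern * ((length // len(pattern)) + 1))[:length]
--         # elif pattern_id == 9:  # Prime positions (approximation): positions 2,3,5,7,11,13...
--         #     primes = [2, 3, 5, 7, 11, 13, 17, 19, 23, 29, 31, 37, 41, 43, 47]
--         #     result = ['0'] * length
--         #     for p in primes:
--         #         if p < length:
--         #             result[p] = '1'
--         #     return ''.join(result)
--
--     result = []
--     for i in range(10):
--         result.append(create_basis_pattern(i, n))
--     return result
-- ===== SOURCE B (Python) =====
-- def make_permutations(n):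
--     """Generate 10 basis vectors with non-random patterns (table-driven tiling)."""
--     PERIODIC = {0: '10', 1: '01', 4: '0011', 5: '1100', 6: '001', 8: '00001', 9: '000111'}
--     result = []
--     for i in range(10):
--         if i in PERIODIC:
--             block = PERIODIC[i]
--             result.append((block * (n // len(block) + 1))[:n])
--         elif i == 2:
--             half = n // 2
--             result.append('1' * half + '0' * (n - half))
--         elif i == 3:
--             half = n // 2
--             result.append('0' * half + '1' * (n - half))
--         else:  # i == 7: quarters 0011110000...
--             quarter = n // 4
--             result.append('0' * quarter + '1' * (2 * quarter) + '0' * (n - 3 * quarter))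
--     return result
-- ===== Notes on version B (the rewrite author's own statement) =====
-- stated objective: faster
-- what changed: Replaces the per-pattern if/elif ladder of per-index Python comprehensions with a table mapping each periodic pattern id to its period block, generated by tiling the block and slicing to length; only the three positional patterns (ids 2, 3, 7) keep their half/quarter slicing.
import Mathlib
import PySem

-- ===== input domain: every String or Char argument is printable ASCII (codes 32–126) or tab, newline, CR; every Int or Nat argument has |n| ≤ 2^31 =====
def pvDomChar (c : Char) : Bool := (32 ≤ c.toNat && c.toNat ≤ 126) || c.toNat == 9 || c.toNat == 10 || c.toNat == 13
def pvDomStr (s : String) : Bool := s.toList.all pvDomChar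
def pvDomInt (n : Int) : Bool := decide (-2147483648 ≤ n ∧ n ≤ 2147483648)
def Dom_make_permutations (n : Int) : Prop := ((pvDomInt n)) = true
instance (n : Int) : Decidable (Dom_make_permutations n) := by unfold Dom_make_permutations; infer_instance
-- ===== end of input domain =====

-- B replaces A's if/elif ladder of per-index comprehensions by a table of period
-- blocks tiled and sliced to length (patterns 2,3,7 keep their positional slicing); same values, simpler control flow.


-- ===== PORT A =====
def create_basis_pattern (pattern_id : Int) (length : Int) : String :=
  if pattern_id == 0 then
    PySem.Str.join "" ((PySem.List.pyRange 0 length 1).map (fun i => if PySem.Int.mod i 2 == 0 then "1" else "0"))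
  else if pattern_id == 1 then
    PySem.Str.join "" ((PySem.List.pyRange 0 length 1).map (fun i => if PySem.Int.mod i 2 == 0 then "0" else "1"))
  else if pattern_id == 2 then
    let half := PySem.Int.floordiv length 2
    String.ofList (PySem.List.pyRepeat ['1'] half ++ PySem.List.pyRepeat ['0'] (length - half))
  else if pattern_id == 3 then
    let half := PySem.Int.floordiv length 2
    String.ofList (PySem.List.pyRepeat ['0'] half ++ PySem.List.pyRepeat ['1'] (length - half))
  else if pattern_id == 4 then
    PySem.Str.join "" ((PySem.List.pyRange 0 length 1).map (fun i => if PySem.Int.mod (PySem.Int.floordiv i 2) 2 == 1 then "1" else "0"))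
  else if pattern_id == 5 then
    PySem.Str.join "" ((PySem.List.pyRange 0 length 1).map (fun i => if PySem.Int.mod (PySem.Int.floordiv i 2) 2 == 1 then "0" else "1"))
  else if pattern_id == 6 then
    PySem.Str.join "" ((PySem.List.pyRange 0 length 1).map (fun i => if PySem.Int.mod i 3 == 2 then "1" else "0"))
  else if pattern_id == 7 then
    let quarter := PySem.Int.floordiv length 4
    String.ofList (PySem.List.pyRepeat ['0'] quarter ++ PySem.List.pyRepeat ['1'] (2 * quarter) ++ PySem.List.pyRepeat ['0'] (length - 3 * quarter))
  else if pattern_id == 8 then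
    PySem.Str.join "" ((PySem.List.pyRange 0 length 1).map (fun i => if PySem.Int.mod i 5 == 4 then "1" else "0"))
  else if pattern_id == 9 then
    PySem.Str.join "" ((PySem.List.pyRange 0 length 1).map (fun i => if PySem.Int.mod (PySem.Int.floordiv i 3) 2 == 1 then "1" else "0"))
  else ""  -- unreachable: the Python helper falls through (returns None) only for ids outside 0..9, which the loop never passes

def make_permutations (n : Int) : List String :=
  (PySem.List.pyRange 0 10 1).foldl (fun acc i => acc ++ [create_basis_pattern i n]) []

-- ===== PORT B =====
def pvPeriodic : PySem.Dict Int String :=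
  PySem.Dict.ofList [(0, "10"), (1, "01"), (4, "0011"), (5, "1100"), (6, "001"), (8, "00001"), (9, "000111")]

-- (block * (n // len(block) + 1))[:n]
def pvTile (block : String) (n : Int) : String :=
  PySem.Str.slice (String.ofList (PySem.List.pyRepeat block.toList (PySem.Int.floordiv n (PySem.Str.len block) + 1))) none (some n)

def make_permutations_alt (n : Int) : List String :=
  (PySem.List.pyRange 0 10 1).foldl (fun acc i =>
    acc ++ [match pvPeriodic.get? i with
      | some block => pvTile block n
      | none =>
        if i == 2 then
          let half := PySem.Int.floordiv n 2
          String.ofList (PySem.List.pyRepeat ['1'] half ++ PySem.List.pyRepeat ['0'] (n - half))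
        else if i == 3 then
          let half := PySem.Int.floordiv n 2
          String.ofList (PySem.List.pyRepeat ['0'] half ++ PySem.List.pyRepeat ['1'] (n - half))
        else
          let quarter := PySem.Int.floordiv n 4
          String.ofList (PySem.List.pyRepeat ['0'] quarter ++ PySem.List.pyRepeat ['1'] (2 * quarter) ++ PySem.List.pyRepeat ['0'] (n - 3 * quarter))]) []

-- ===== PRECONDITION & SPEC =====
def Spec_make_permutations (n : Int) (out : List String) : Prop := out = make_permutations_alt n
instance (n : Int) (out : List String) : Decidable (Spec_make_permutations n out) := by unfold Spec_make_permutations; infer_instance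

-- ===== CLAIM (what is proved, stated in full; the proofs are below) =====
def Claim_equal_make_permutations : Prop := ∀ (n : Int), Dom_make_permutations n → Spec_make_permutations n (make_permutations n)

-- ===== LEMMAS AND PROOFS =====

-- ''.join of one-char strings is the string of the chars
lemma pv_join_bits (l : List Int) (c : Int → Bool) (sx sy : String) (x y : Char)
    (hx : sx.toList = [x]) (hy : sy.toList = [y]) :
    PySem.Str.join "" (l.map (fun i => if c i then sx else sy))
      = String.ofList (l.map (fun i => if c i then x else y)) := by
  apply String.toList_inj.mp
  rw [PySem.Str.toList_join]
  have h : (l.map (fun i => if c i then sx else sy)).map String.toList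
      = (l.map (fun i => if c i then x else y)).map (fun ch => [ch]) := by
    simp only [List.map_map]
    refine List.map_congr_left (fun i _ => ?_)
    by_cases hc : c i <;> simp [hc, hx, hy]
  have hsep : ("" : String).toList = [] := rfl
  simp only [h, hsep, PySem.Chars.join_nil_singletons, String.toList_ofList]

-- indexing a flattened replicate is indexing the block modulo its length
lemma pv_flatten_replicate_getD (b : List Char) (d : Char) :
    ∀ (q k : Nat), k < ((List.replicate q b).flatten).length →
      ((List.replicate q b).flatten).getD k d = b.getD (k % b.length) d := by
  intro q
  induction q with
  | zero => intro k hk; simp at hk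
  | succ q ih =>
    intro k hk
    rw [List.replicate_succ, List.flatten_cons] at hk ⊢
    by_cases hcase : k < b.length
    · rw [List.getD_append _ _ _ _ hcase, Nat.mod_eq_of_lt hcase]
    · have hle : b.length ≤ k := Nat.le_of_not_lt hcase
      rw [List.length_append] at hk
      rw [List.getD_append_right _ _ _ _ hle, ih (k - b.length) (by omega)]
      rw [Nat.mod_eq_sub_mod hle]

-- core: a pointwise-periodic comprehension equals the tiled-and-sliced block
lemma pv_tile_eq (b : String) (g : Int → Char) (hb : 0 < b.toList.length)
    (hg : ∀ k : Nat, g k = b.toList.getD (k % b.toList.length) 'A') (n : Int) :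
    String.ofList ((PySem.List.pyRange 0 n 1).map g) = pvTile b n := by
  apply String.toList_inj.mp
  rw [String.toList_ofList]
  unfold pvTile
  rw [PySem.Str.toList_slice, PySem.Chars.slice_eq_listSlice, String.toList_ofList]
  by_cases hn : n ≤ 0
  · -- empty output on both sides
    rw [PySem.List.pyRange_one_eq_nil hn, List.map_nil]
    by_cases h0 : n = 0
    · -- n = 0 : slice to 0 is take 0
      rw [h0, PySem.List.slice_to _ (le_refl 0)]
      simp
    · -- n < 0 : the repeat count is ≤ 0, so the tiled list is already empty
      have hneg : n < 0 := by omega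
      have hq : PySem.Int.floordiv n (PySem.Str.len b) + 1 ≤ 0 := by
        rw [PySem.Str.len_eq, PySem.Int.floordiv_eq_ediv_of_pos (by exact_mod_cast hb)]
        have : n / (b.toList.length : Int) < 0 :=
          Int.ediv_neg_of_neg_of_pos hneg (by exact_mod_cast hb)
        omega
      have hrep : PySem.List.pyRepeat b.toList (PySem.Int.floordiv n (PySem.Str.len b) + 1) = [] := by
        unfold PySem.List.pyRepeat
        have h0' : (PySem.Int.floordiv n (PySem.Str.len b) + 1).toNat = 0 := by omega
        rw [h0']
        simp
      rw [hrep]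
      simp [PySem.List.slice]
  · -- n = m > 0
    have hn' : 0 < n := by omega
    obtain ⟨m, rfl⟩ : ∃ m : Nat, n = (m : Int) := ⟨n.toNat, (Int.toNat_of_nonneg hn'.le).symm⟩
    set p := b.toList.length with hp
    set q := m / p + 1 with hqdef
    have hfd : PySem.Int.floordiv (m : Int) (PySem.Str.len b) + 1 = ((q : Nat) : Int) := by
      rw [PySem.Str.len_eq, ← hp, PySem.Int.floordiv_eq_ediv_of_pos (by exact_mod_cast hb), hqdef]
      push_cast
      rw [← Int.natCast_ediv]
      try push_cast
      try ring
    rw [hfd, PySem.List.slice_to _ (by exact_mod_cast Nat.zero_le m), Int.toNat_natCast]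
    unfold PySem.List.pyRepeat
    rw [Int.toNat_natCast]
    rw [PySem.List.pyRange_zero_natCast, List.map_map]
    have hflat : ((List.replicate q b.toList).flatten).length = q * p := by
      simp [hp, Nat.mul_comm]
    have hmq : m ≤ q * p := by
      calc m = p * (m / p) + m % p := (Nat.div_add_mod m p).symm
        _ ≤ p * (m / p) + p := Nat.add_le_add_left (Nat.le_of_lt (Nat.mod_lt m hb)) _
        _ = q * p := by rw [hqdef]; ring
    apply List.ext_getElem
    · simp [hflat, hmq]
    · intro k hk1 hk2
      have hkm : k < m := by simpa using hk1
      have hkf : k < ((List.replicate q b.toList).flatten).length := by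
        rw [hflat]; exact lt_of_lt_of_le hkm hmq
      rw [List.getElem_map, List.getElem_take, ← List.getD_eq_getElem _ 'A' hkf,
        pv_flatten_replicate_getD b.toList 'A' q k hkf]
      simp only [List.getElem_range, Function.comp_apply]
      exact hg k

-- a periodic comprehension of A equals B's tiling, given the pointwise fact
lemma pv_periodic_pattern (b : String) (c : Int → Bool) (sx sy : String) (x y : Char)
    (hx : sx.toList = [x]) (hy : sy.toList = [y]) (hb : 0 < b.toList.length)
    (hg : ∀ k : Nat, (if c (k : Int) then x else y) = b.toList.getD (k % b.toList.length) 'A') (n : Int) :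
    PySem.Str.join "" ((PySem.List.pyRange 0 n 1).map (fun i => if c i then sx else sy)) = pvTile b n := by
  rw [pv_join_bits (PySem.List.pyRange 0 n 1) c sx sy x y hx hy]
  exact pv_tile_eq b (fun i => if c i then x else y) hb hg n

-- per-pattern pointwise characterisations
lemma pv_hg0 : ∀ k : Nat, (if PySem.Int.mod (k : Int) 2 == 0 then '1' else '0')
    = "10".toList.getD (k % "10".toList.length) 'A' := by
  intro k
  rw [PySem.Int.mod_eq_emod_of_pos (by norm_num)]
  have h : k % 2 = 0 ∨ k % 2 = 1 := by omega
  rcases h with h | h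
  · have h2 : (k : Int) % 2 = 0 := by omega
    simp [h2, h]
  · have h2 : (k : Int) % 2 = 1 := by omega
    simp [h2, h]

lemma pv_hg1 : ∀ k : Nat, (if PySem.Int.mod (k : Int) 2 == 0 then '0' else '1')
    = "01".toList.getD (k % "01".toList.length) 'A' := by
  intro k
  rw [PySem.Int.mod_eq_emod_of_pos (by norm_num)]
  have h : k % 2 = 0 ∨ k % 2 = 1 := by omega
  rcases h with h | h
  · have h2 : (k : Int) % 2 = 0 := by omega
    simp [h2, h]
  · have h2 : (k : Int) % 2 = 1 := by omega
    simp [h2, h]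

lemma pv_hg4 : ∀ k : Nat, (if PySem.Int.mod (PySem.Int.floordiv (k : Int) 2) 2 == 1 then '1' else '0')
    = "0011".toList.getD (k % "0011".toList.length) 'A' := by
  intro k
  rw [PySem.Int.floordiv_eq_ediv_of_pos (by norm_num), PySem.Int.mod_eq_emod_of_pos (by norm_num)]
  have h : k % 4 = 0 ∨ k % 4 = 1 ∨ k % 4 = 2 ∨ k % 4 = 3 := by omega
  rcases h with h | h | h | h
  · have h2 : ((k : Int) / 2) % 2 = 0 := by omega
    simp [h2, h]
  · have h2 : ((k : Int) / 2) % 2 = 0 := by omega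
    simp [h2, h]
  · have h2 : ((k : Int) / 2) % 2 = 1 := by omega
    simp [h2, h]
  · have h2 : ((k : Int) / 2) % 2 = 1 := by omega
    simp [h2, h]

lemma pv_hg5 : ∀ k : Nat, (if PySem.Int.mod (PySem.Int.floordiv (k : Int) 2) 2 == 1 then '0' else '1')
    = "1100".toList.getD (k % "1100".toList.length) 'A' := by
  intro k
  rw [PySem.Int.floordiv_eq_ediv_of_pos (by norm_num), PySem.Int.mod_eq_emod_of_pos (by norm_num)]
  have h : k % 4 = 0 ∨ k % 4 = 1 ∨ k % 4 = 2 ∨ k % 4 = 3 := by omega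
  rcases h with h | h | h | h
  · have h2 : ((k : Int) / 2) % 2 = 0 := by omega
    simp [h2, h]
  · have h2 : ((k : Int) / 2) % 2 = 0 := by omega
    simp [h2, h]
  · have h2 : ((k : Int) / 2) % 2 = 1 := by omega
    simp [h2, h]
  · have h2 : ((k : Int) / 2) % 2 = 1 := by omega
    simp [h2, h]

lemma pv_hg6 : ∀ k : Nat, (if PySem.Int.mod (k : Int) 3 == 2 then '1' else '0')
    = "001".toList.getD (k % "001".toList.length) 'A' := by
  intro k
  rw [PySem.Int.mod_eq_emod_of_pos (by norm_num)]
  have h : k % 3 = 0 ∨ k % 3 = 1 ∨ k % 3 = 2 := by omega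
  rcases h with h | h | h
  · have h2 : (k : Int) % 3 = 0 := by omega
    simp [h2, h]
  · have h2 : (k : Int) % 3 = 1 := by omega
    simp [h2, h]
  · have h2 : (k : Int) % 3 = 2 := by omega
    simp [h2, h]

lemma pv_hg8 : ∀ k : Nat, (if PySem.Int.mod (k : Int) 5 == 4 then '1' else '0')
    = "00001".toList.getD (k % "00001".toList.length) 'A' := by
  intro k
  rw [PySem.Int.mod_eq_emod_of_pos (by norm_num)]
  have h : k % 5 = 0 ∨ k % 5 = 1 ∨ k % 5 = 2 ∨ k % 5 = 3 ∨ k % 5 = 4 := by omega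
  rcases h with h | h | h | h | h
  · have h2 : (k : Int) % 5 = 0 := by omega
    simp [h2, h]
  · have h2 : (k : Int) % 5 = 1 := by omega
    simp [h2, h]
  · have h2 : (k : Int) % 5 = 2 := by omega
    simp [h2, h]
  · have h2 : (k : Int) % 5 = 3 := by omega
    simp [h2, h]
  · have h2 : (k : Int) % 5 = 4 := by omega
    simp [h2, h]

lemma pv_hg9 : ∀ k : Nat, (if PySem.Int.mod (PySem.Int.floordiv (k : Int) 3) 2 == 1 then '1' else '0')
    = "000111".toList.getD (k % "000111".toList.length) 'A' := by
  intro k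
  rw [PySem.Int.floordiv_eq_ediv_of_pos (by norm_num), PySem.Int.mod_eq_emod_of_pos (by norm_num)]
  have h : k % 6 = 0 ∨ k % 6 = 1 ∨ k % 6 = 2 ∨ k % 6 = 3 ∨ k % 6 = 4 ∨ k % 6 = 5 := by omega
  rcases h with h | h | h | h | h | h
  · have h2 : ((k : Int) / 3) % 2 = 0 := by omega
    simp [h2, h]
  · have h2 : ((k : Int) / 3) % 2 = 0 := by omega
    simp [h2, h]
  · have h2 : ((k : Int) / 3) % 2 = 0 := by omega
    simp [h2, h]
  · have h2 : ((k : Int) / 3) % 2 = 1 := by omega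
    simp [h2, h]
  · have h2 : ((k : Int) / 3) % 2 = 1 := by omega
    simp [h2, h]
  · have h2 : ((k : Int) / 3) % 2 = 1 := by omega
    simp [h2, h]

-- ===== VERDICT (by name: the statement is the Claim_ definition above) =====
theorem make_permutations_spec : Claim_equal_make_permutations := by
  intro n _
  unfold Spec_make_permutations make_permutations make_permutations_alt
  have h10 : PySem.List.pyRange 0 10 1 = [0,1,2,3,4,5,6,7,8,9] := by decide
  rw [h10]
  simp only [List.foldl, List.nil_append]
  have g0 : pvPeriodic.get? 0 = some "10" := by rfl
  have g1 : pvPeriodic.get? 1 = some "01" := by rfl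
  have g2 : pvPeriodic.get? 2 = none := by rfl
  have g3 : pvPeriodic.get? 3 = none := by rfl
  have g4 : pvPeriodic.get? 4 = some "0011" := by rfl
  have g5 : pvPeriodic.get? 5 = some "1100" := by rfl
  have g6 : pvPeriodic.get? 6 = some "001" := by rfl
  have g7 : pvPeriodic.get? 7 = none := by rfl
  have g8 : pvPeriodic.get? 8 = some "00001" := by rfl
  have g9 : pvPeriodic.get? 9 = some "000111" := by rfl
  simp only [g0, g1, g2, g3, g4, g5, g6, g7, g8, g9, create_basis_pattern]
  simp only [beq_iff_eq, Int.reduceEq, reduceIte]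
  simp only [List.append_assoc, List.cons_append, List.nil_append]
  simp only [List.cons.injEq, and_true, true_and]
  refine ⟨?_, ?_, ?_, ?_, ?_, ?_, ?_⟩
  · simpa only [beq_iff_eq] using pv_periodic_pattern "10" (fun i => PySem.Int.mod i 2 == 0) "1" "0" '1' '0' rfl rfl (by decide) pv_hg0 n
  · simpa only [beq_iff_eq] using pv_periodic_pattern "01" (fun i => PySem.Int.mod i 2 == 0) "0" "1" '0' '1' rfl rfl (by decide) pv_hg1 n
  · simpa only [beq_iff_eq] using pv_periodic_pattern "0011" (fun i => PySem.Int.mod (PySem.Int.floordiv i 2) 2 == 1) "1" "0" '1' '0' rfl rfl (by decide) pv_hg4 n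
  · simpa only [beq_iff_eq] using pv_periodic_pattern "1100" (fun i => PySem.Int.mod (PySem.Int.floordiv i 2) 2 == 1) "0" "1" '0' '1' rfl rfl (by decide) pv_hg5 n
  · simpa only [beq_iff_eq] using pv_periodic_pattern "001" (fun i => PySem.Int.mod i 3 == 2) "1" "0" '1' '0' rfl rfl (by decide) pv_hg6 n
  · simpa only [beq_iff_eq] using pv_periodic_pattern "00001" (fun i => PySem.Int.mod i 5 == 4) "1" "0" '1' '0' rfl rfl (by decide) pv_hg8 n
  · simpa only [beq_iff_eq] using pv_periodic_pattern "000111" (fun i => PySem.Int.mod (PySem.Int.floordiv i 3) 2 == 1) "1" "0" '1' '0' rfl rfl (by decide) pv_hg9 n
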